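-- pv_equiv track=rewrite | github.com/MohiuddinSohel/Leetcoding | amazonOAPreparation/OA.py | continuous_segment
-- ===== SOURCE A (Python) =====
-- def continuous_segment(capacity):
--     count, tracker = 0, {}
--     for i in range(2, len(capacity)):
--         count += (capacity[i - 2] == capacity[i - 1] == capacity[i])
--     for i, cap in enumerate(capacity):
--         if cap in tracker and cap == (capacity[i - 1] - capacity[tracker[cap]]):
--             count += 1
--         tracker[cap] = i
--         if i > 0:
--             capacity[i] += capacity[i - 1]
--     return count
-- ===== SOURCE B (Python) =====
-- def continuous_segment(capacity):
--     # Single pass, no index arithmetic: run-length counting for equal triples,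
--     # a running total (prefix sum) and a dict mapping each value to the prefix
--     # sum at its last occurrence.  Mutates capacity into its prefix sums, like A.
--     count = 0
--     run = 0
--     prev = None
--     total = 0
--     last_psum = {}
--     prefix = []
--     for v in capacity:
--         if prev is not None and v == prev:
--             run += 1
--             if run >= 3:
--                 count += 1
--         else:
--             run = 1
--         if v in last_psum and v == total - last_psum[v]:
--             count += 1
--         total += v
--         last_psum[v] = total
--         prev = v
--         prefix.append(total)
--     capacity[:] = prefix
--     return count
-- ===== Notes on version B (the rewrite author's own statement) =====
-- stated objective: alternative
-- what changed: B replaces A's two index-based loops (a range(2,n) triple scan plus an interleaved enumerate loop that mutates the list while reading it by index) with one index-free pass over the values maintaining a run-length counter, a running prefix total, and a dict mapping each value directly to the prefix sum at its last occurrence, so no mutated array is ever read.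
import Mathlib
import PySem

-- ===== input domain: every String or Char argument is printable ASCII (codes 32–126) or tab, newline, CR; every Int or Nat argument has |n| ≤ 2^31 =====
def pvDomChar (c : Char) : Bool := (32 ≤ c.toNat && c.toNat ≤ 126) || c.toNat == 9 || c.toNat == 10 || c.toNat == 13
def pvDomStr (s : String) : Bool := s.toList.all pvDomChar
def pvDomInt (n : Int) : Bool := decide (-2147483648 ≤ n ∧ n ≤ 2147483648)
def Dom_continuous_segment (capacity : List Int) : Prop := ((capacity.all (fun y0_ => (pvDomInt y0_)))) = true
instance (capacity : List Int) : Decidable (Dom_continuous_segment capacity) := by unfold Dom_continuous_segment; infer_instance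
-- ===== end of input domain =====

-- B is an index-free single pass (run-length counter + running prefix total + value→prefix-sum dict)
-- replacing A's range loop plus interleaved mutate-and-read loop; same cost, no mutated array reads.
-- Python A mutates `capacity` into its prefix sums; Python B performs the same mutation; the theorems
-- here are about the return value.

-- ===== PORT A =====
-- first loop body: count += (capacity[i-2] == capacity[i-1] == capacity[i]); indices are always
-- in range (2 ≤ i < len), so the .getD 0 default after pyGet? is never taken.
def csLoop1Step (capacity : List Int) (count : Int) (i : Int) : Int :=
  count +
    (if (PySem.List.pyGet? capacity (i - 2)).getD 0 = (PySem.List.pyGet? capacity (i - 1)).getD 0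
        ∧ (PySem.List.pyGet? capacity (i - 1)).getD 0 = (PySem.List.pyGet? capacity i).getD 0
     then 1 else 0)
-- second loop body over state (count, tracker, capacity); `cap in tracker and …` becomes the match,
-- capacity[i-1]/capacity[tracker[cap]] are always in range (i-1 = -1 only when tracker is empty),
-- so the .getD 0 defaults are never taken; `capacity[i] += capacity[i-1]` is the List.set.
def csLoop2Step (st : Int × PySem.Dict Int Int × List Int) (i : Int) :
    Int × PySem.Dict Int Int × List Int :=
  let count := st.1
  let tracker := st.2.1
  let caps := st.2.2
  let cap := (PySem.List.pyGet? caps i).getD 0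
  let count :=
    match tracker.get? cap with
    | some j =>
        if cap = (PySem.List.pyGet? caps (i - 1)).getD 0 - (PySem.List.pyGet? caps j).getD 0
        then count + 1 else count
    | none => count
  let tracker := tracker.insert cap i
  let caps :=
    if 0 < i then
      caps.set i.toNat ((PySem.List.pyGet? caps i).getD 0 + (PySem.List.pyGet? caps (i - 1)).getD 0)
    else caps
  (count, tracker, caps)

def continuous_segment (capacity : List Int) : Int :=
  let count0 : Int :=
    (PySem.List.pyRange 2 (capacity.length : Int) 1).foldl (csLoop1Step capacity) 0
  ((PySem.List.pyRange 0 (capacity.length : Int) 1).foldl csLoop2Step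
      (count0, PySem.Dict.empty, capacity)).1

-- ===== PORT B =====
-- state: (count, run, prev, total, last_psum, prefix); `prefix` is the list B writes back into
-- `capacity` (a side effect only — it does not influence the returned count).
def csAltStep (st : Int × Int × Option Int × Int × PySem.Dict Int Int × List Int) (v : Int) :
    Int × Int × Option Int × Int × PySem.Dict Int Int × List Int :=
  let count := st.1
  let run := st.2.1
  let prev := st.2.2.1
  let total := st.2.2.2.1
  let last := st.2.2.2.2.1
  let pref := st.2.2.2.2.2
  let rc : Int × Int :=
    if prev = some v then (run + 1, if run + 1 ≥ 3 then count + 1 else count)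
    else (1, count)
  let run := rc.1
  let count := rc.2
  let count :=
    match last.get? v with
    | some p => if v = total - p then count + 1 else count
    | none => count
  let total := total + v
  (count, run, some v, total, last.insert v total, pref ++ [total])

def continuous_segment_alt (capacity : List Int) : Int :=
  (capacity.foldl csAltStep (0, 0, none, 0, PySem.Dict.empty, [])).1

-- ===== PRECONDITION & SPEC =====
def Spec_continuous_segment (capacity : List Int) (out : Int) : Prop := out = continuous_segment_alt capacity
instance (capacity : List Int) (out : Int) : Decidable (Spec_continuous_segment capacity out) := by unfold Spec_continuous_segment; infer_instance

-- ===== CLAIM (what is proved, stated in full; the proofs are below) =====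
def Claim_equal_continuous_segment : Prop := ∀ (capacity : List Int), Dom_continuous_segment capacity → Spec_continuous_segment capacity (continuous_segment capacity)

-- ===== LEMMAS AND PROOFS =====

-- value of xs at index k (indices we use are always < xs.length, so the default is immaterial)
def pvG (xs : List Int) (k : Nat) : Int := (xs[k]?).getD 0
-- sum of the first k elements
def pvQ (xs : List Int) (k : Nat) : Int := (xs.take k).sum
-- last index j < k with xs[j] = v
def pvLast (xs : List Int) : Nat → Int → Option Nat
  | 0, _ => none
  | k+1, v => if pvG xs k = v then some k else pvLast xs k v
-- number of equal triples among the first k elements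
def pvT (xs : List Int) : Nat → Int
  | 0 => 0
  | k+1 => pvT xs k +
      (if 2 ≤ k ∧ pvG xs (k-2) = pvG xs (k-1) ∧ pvG xs (k-1) = pvG xs k then 1 else 0)
-- number of "segment" hits among the first k elements
def pvS (xs : List Int) : Nat → Int
  | 0 => 0
  | k+1 => pvS xs k +
      (match pvLast xs k (pvG xs k) with
       | some j => if pvG xs k = pvQ xs k - pvQ xs (j+1) then 1 else 0
       | none => 0)
-- length of the maximal equal run ending at index k-1
def pvRun (xs : List Int) : Nat → Nat
  | 0 => 0
  | k+1 => if 1 ≤ k ∧ pvG xs k = pvG xs (k-1) then pvRun xs k + 1 else 1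
-- A's tracker after k steps
def pvTrack (xs : List Int) : Nat → PySem.Dict Int Int
  | 0 => PySem.Dict.empty
  | k+1 => (pvTrack xs k).insert (pvG xs k) (k : Int)
-- B's last_psum after k steps
def pvPsum (xs : List Int) : Nat → PySem.Dict Int Int
  | 0 => PySem.Dict.empty
  | k+1 => (pvPsum xs k).insert (pvG xs k) (pvQ xs (k+1))
-- A's capacity list after k steps of the second loop
def pvMut (xs : List Int) : Nat → List Int
  | 0 => xs
  | k+1 => if 0 < k then (pvMut xs k).set k (pvQ xs (k+1)) else pvMut xs k
-- B's prefix list after k steps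
def pvPref (xs : List Int) (k : Nat) : List Int := (List.range k).map (fun i => pvQ xs (i+1))

lemma pvQ_succ (xs : List Int) (k : Nat) (h : k < xs.length) :
    pvQ xs (k+1) = pvQ xs k + pvG xs k := by
  unfold pvQ pvG
  rw [List.take_add_one, List.getElem?_eq_getElem h, List.sum_append]
  simp

lemma pvLast_lt {xs : List Int} {k : Nat} {v : Int} {j : Nat}
    (h : pvLast xs k v = some j) : j < k := by
  induction k with
  | zero => simp [pvLast] at h
  | succ k ih =>
    unfold pvLast at h
    split_ifs at h with hv
    · injection h with h; omega
    · exact Nat.lt_succ_of_lt (ih h)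

lemma pvT_succ (xs : List Int) (k : Nat) :
    pvT xs (k+1) = pvT xs k +
      (if 2 ≤ k ∧ pvG xs (k-2) = pvG xs (k-1) ∧ pvG xs (k-1) = pvG xs k then 1 else 0) := rfl

lemma pvS_succ (xs : List Int) (k : Nat) :
    pvS xs (k+1) = pvS xs k +
      (match pvLast xs k (pvG xs k) with
       | some j => if pvG xs k = pvQ xs k - pvQ xs (j+1) then 1 else 0
       | none => 0) := rfl

lemma pvTrack_get? (xs : List Int) (k : Nat) (v : Int) :
    (pvTrack xs k).get? v = (pvLast xs k v).map (fun j => (j : Int)) := by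
  induction k with
  | zero => simp [pvTrack, pvLast]
  | succ k ih =>
    unfold pvTrack pvLast
    rw [PySem.Dict.get?_insert]
    by_cases h : v = pvG xs k
    · simp [h]
    · simp [h, Ne.symm h, ih]

lemma pvPsum_get? (xs : List Int) (k : Nat) (v : Int) :
    (pvPsum xs k).get? v = (pvLast xs k v).map (fun j => pvQ xs (j+1)) := by
  induction k with
  | zero => simp [pvPsum, pvLast]
  | succ k ih =>
    unfold pvPsum pvLast
    rw [PySem.Dict.get?_insert]
    by_cases h : v = pvG xs k
    · simp [h]
    · simp [h, Ne.symm h, ih]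

lemma pvMut_length (xs : List Int) (k : Nat) : (pvMut xs k).length = xs.length := by
  induction k with
  | zero => rfl
  | succ k ih => unfold pvMut; split_ifs <;> simp [ih]

lemma pvMut_get_ge (xs : List Int) {k i : Nat} (h : k ≤ i) :
    pvG (pvMut xs k) i = pvG xs i := by
  induction k with
  | zero => rfl
  | succ k ih =>
    unfold pvMut
    split_ifs with hk
    · have hne : k ≠ i := by omega
      simp [pvG, List.getElem?_set_ne hne]
      have := ih (by omega)
      simpa [pvG] using this
    · exact ih (by omega)

lemma pvMut_get_lt (xs : List Int) {k i : Nat} (h : i < k) (hn : i < xs.length) :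
    pvG (pvMut xs k) i = pvQ xs (i+1) := by
  induction k with
  | zero => omega
  | succ k ih =>
    unfold pvMut
    by_cases hik : i < k
    · have := ih hik
      split_ifs with hk
      · have hne : k ≠ i := by omega
        simpa [pvG, List.getElem?_set_ne hne] using this
      · exact this
    · have hik' : i = k := by omega
      subst hik'
      split_ifs with hk
      · have hlen : i < (pvMut xs i).length := by rw [pvMut_length]; exact hn
        simp [pvG, List.getElem?_set_self hlen]
      · have h0 : i = 0 := by omega
        subst h0
        have := pvQ_succ xs 0 hn
        simp [pvQ] at this ⊢
        simpa [pvMut] using this.symm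

lemma pvRun_pos (xs : List Int) (k : Nat) (hk : 1 ≤ k) : 1 ≤ pvRun xs k := by
  obtain ⟨m, rfl⟩ : ∃ m, k = m + 1 := ⟨k - 1, by omega⟩
  unfold pvRun
  split_ifs <;> omega

lemma pvRun_ge2 (xs : List Int) (k : Nat) (hk : 1 ≤ k) :
    (2 ≤ pvRun xs k) ↔ (2 ≤ k ∧ pvG xs (k-1) = pvG xs (k-2)) := by
  obtain ⟨m, rfl⟩ : ∃ m, k = m + 1 := ⟨k - 1, by omega⟩
  have e1 : m + 1 - 1 = m := by omega
  have e2 : m + 1 - 2 = m - 1 := by omega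
  rw [e1, e2]
  unfold pvRun
  split_ifs with h
  · constructor
    · intro _; exact ⟨by omega, h.2⟩
    · intro _
      have := pvRun_pos xs m h.1
      omega
  · constructor
    · intro h2; omega

    · intro ⟨h2, he⟩
      exact absurd ⟨by omega, he⟩ h

-- ===== Loop A1: the first loop computes pvT =====
lemma A_loop1 (xs : List Int) (m : Nat) (c : Int) :
    (PySem.List.pyRange 2 (m : Int) 1).foldl (csLoop1Step xs) c = c + pvT xs m := by
  induction m generalizing c with
  | zero => simp [PySem.List.pyRange_one_eq_nil (by omega : (0:Int) ≤ 2), pvT]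
  | succ m ih =>
    by_cases hm : 2 ≤ m
    · have hcast : ((m + 1 : Nat) : Int) = (m : Int) + 1 := by push_cast; ring
      rw [hcast, PySem.List.pyRange_one_succ_right (by exact_mod_cast hm), List.foldl_append]
      rw [ih]
      have e2 : ((m : Int) - 2) = ((m - 2 : Nat) : Int) := by omega
      have e1 : ((m : Int) - 1) = ((m - 1 : Nat) : Int) := by omega
      simp only [List.foldl_cons, List.foldl_nil, csLoop1Step, e2, e1,
        PySem.List.pyGet?_natCast]
      rw [pvT_succ]
      simp only [pvG, hm, true_and]
      ring
    · interval_cases m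
      · simp [PySem.List.pyRange_one_eq_nil (by omega : (1:Int) ≤ 2), pvT]
      · simp [PySem.List.pyRange_one_eq_nil (by omega : (2:Int) ≤ 2), pvT]

-- ===== Loop A2: the second loop's state after k steps =====
lemma A_loop2 (xs : List Int) (c : Int) (k : Nat) (hk : k ≤ xs.length) :
    (PySem.List.pyRange 0 (k : Int) 1).foldl csLoop2Step (c, PySem.Dict.empty, xs)
      = (c + pvS xs k, pvTrack xs k, pvMut xs k) := by
  induction k with
  | zero => simp [pvS, pvTrack, pvMut]
  | succ k ih =>
    have hk' : k ≤ xs.length := by omega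
    have hkn : k < xs.length := by omega
    have hcast : ((k + 1 : Nat) : Int) = (k : Int) + 1 := by push_cast; ring
    rw [hcast, PySem.List.pyRange_one_succ_right (by exact_mod_cast Nat.zero_le k),
      List.foldl_append, ih hk']
    simp only [List.foldl_cons, List.foldl_nil]
    show csLoop2Step (c + pvS xs k, pvTrack xs k, pvMut xs k) (k : Int)
        = (c + pvS xs (k+1), pvTrack xs (k+1), pvMut xs (k+1))
    unfold csLoop2Step
    simp only []
    have hcap : (PySem.List.pyGet? (pvMut xs k) (k : Int)).getD 0 = pvG xs k := by
      rw [PySem.List.pyGet?_natCast]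
      exact pvMut_get_ge xs (le_refl k)
    refine Prod.ext ?_ (Prod.ext ?_ ?_)
    · -- count component
      rw [pvS_succ]
      cases hlast : pvLast xs k (pvG xs k) with
      | none =>
        have htr : (pvTrack xs k).get? (pvG xs k) = none := by
          rw [pvTrack_get?, hlast]; rfl
        have hcap2 : (pvMut xs k)[k]?.getD 0 = pvG xs k := pvMut_get_ge xs (le_refl k)
        simp [hcap2, htr]
      | some j =>
        have hjk : j < k := pvLast_lt hlast
        have hjn : j < xs.length := by omega
        have htr : (pvTrack xs k).get? (pvG xs k) = some ((j : Nat) : Int) := by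
          rw [pvTrack_get?, hlast]; rfl
        have e1 : ((k : Int) - 1) = ((k - 1 : Nat) : Int) := by omega
        have hg1 : (PySem.List.pyGet? (pvMut xs k) ((k : Int) - 1)).getD 0 = pvQ xs k := by
          rw [e1, PySem.List.pyGet?_natCast]
          have := pvMut_get_lt xs (show k - 1 < k by omega) (show k - 1 < xs.length by omega)
          rw [show k - 1 + 1 = k by omega] at this
          exact this
        have hgj : (PySem.List.pyGet? (pvMut xs k) ((j : Nat) : Int)).getD 0 = pvQ xs (j+1) := by
          rw [PySem.List.pyGet?_natCast]
          exact pvMut_get_lt xs hjk hjn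
        simp only [hcap, htr]
        rw [hg1, hgj]
        split_ifs <;> ring
    · -- tracker component
      simp only [hcap]
      rfl
    · -- caps component
      simp only [hcap]
      by_cases hk0 : 0 < k
      · have hpos : (0:Int) < (k : Int) := by exact_mod_cast hk0
        have e1 : ((k : Int) - 1) = ((k - 1 : Nat) : Int) := by omega
        have hg1 : (PySem.List.pyGet? (pvMut xs k) ((k : Int) - 1)).getD 0 = pvQ xs k := by
          rw [e1, PySem.List.pyGet?_natCast]
          have := pvMut_get_lt xs (show k - 1 < k by omega) (show k - 1 < xs.length by omega)
          rw [show k - 1 + 1 = k by omega] at this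
          exact this
        simp only [hpos, if_true, hg1, Int.toNat_natCast]
        have hstep : pvMut xs (k+1) = (pvMut xs k).set k (pvQ xs (k+1)) := by
          rw [show pvMut xs (k+1)
                = if 0 < k then (pvMut xs k).set k (pvQ xs (k+1)) else pvMut xs k from rfl,
            if_pos hk0]
        rw [hstep, pvQ_succ xs k hkn, add_comm (pvQ xs k) (pvG xs k)]
      · have h0 : k = 0 := by omega
        subst h0
        simp [pvMut]

-- ===== Loop B: B's state after k steps =====
lemma B_loop (xs : List Int) (k : Nat) (hk : k ≤ xs.length) :
    (xs.take k).foldl csAltStep (0, 0, none, 0, PySem.Dict.empty, []) =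
      (pvT xs k + pvS xs k, (pvRun xs k : Int),
        (if k = 0 then none else some (pvG xs (k-1))), pvQ xs k, pvPsum xs k, pvPref xs k) := by
  induction k with
  | zero => simp [pvT, pvS, pvRun, pvQ, pvPsum, pvPref]
  | succ k ih =>
    have hk' : k ≤ xs.length := by omega
    have hkn : k < xs.length := by omega
    have htake : xs.take (k+1) = xs.take k ++ [pvG xs k] := by
      rw [List.take_add_one]
      simp [pvG, List.getElem?_eq_getElem hkn]
    rw [htake, List.foldl_append, ih hk']
    simp only [List.foldl_cons, List.foldl_nil]
    unfold csAltStep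
    simp only []
    have hprev : ((if k = 0 then none else some (pvG xs (k-1))) = some (pvG xs k))
        ↔ (1 ≤ k ∧ pvG xs (k-1) = pvG xs k) := by
      by_cases h0 : k = 0
      · simp [h0]
      · simp [h0]
        omega
    refine Prod.ext ?_ (Prod.ext ?_ (Prod.ext ?_ (Prod.ext ?_ (Prod.ext ?_ ?_))))
    · -- count component
      simp only [pvPsum_get?]
      have hcnt1 : (if (if k = 0 then none else some (pvG xs (k-1))) = some (pvG xs k) then
            ((pvRun xs k : Int) + 1, if (pvRun xs k : Int) + 1 ≥ 3 then pvT xs k + pvS xs k + 1 else pvT xs k + pvS xs k)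
          else (1, pvT xs k + pvS xs k)).2 = pvT xs (k+1) + pvS xs k := by
        rw [pvT_succ]
        by_cases hc : (if k = 0 then none else some (pvG xs (k-1))) = some (pvG xs k)
        · rw [if_pos hc]
          obtain ⟨hk1, heq⟩ := hprev.mp hc
          have hrun : ((pvRun xs k : Int) + 1 ≥ 3) ↔ (2 ≤ pvRun xs k) := by omega
          by_cases h2 : 2 ≤ pvRun xs k
          · obtain ⟨hk2, he2⟩ := (pvRun_ge2 xs k hk1).mp h2
            simp only [hrun, h2, if_true]
            rw [if_pos ⟨hk2, by rw [he2] at heq ⊢; exact ⟨he2.symm.trans (by rw [he2]), heq⟩⟩]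
            ring
          · have hnot : ¬ (2 ≤ k ∧ pvG xs (k-2) = pvG xs (k-1) ∧ pvG xs (k-1) = pvG xs k) := by
              intro ⟨ha, hb, _⟩
              exact h2 ((pvRun_ge2 xs k hk1).mpr ⟨ha, hb.symm⟩)
            simp only [hrun, h2, if_false]
            rw [if_neg hnot]
            ring
        · rw [if_neg hc]
          have hnot : ¬ (2 ≤ k ∧ pvG xs (k-2) = pvG xs (k-1) ∧ pvG xs (k-1) = pvG xs k) := by
            intro ⟨ha, _, hcq⟩
            exact hc (hprev.mpr ⟨by omega, hcq⟩)
          rw [if_neg hnot]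
          ring
      rw [hcnt1]
      rw [pvS_succ]
      cases hlast : pvLast xs k (pvG xs k) with
      | none => simp
      | some j =>
        simp only [Option.map_some]
        split_ifs <;> ring
    · -- run component
      have : pvRun xs (k+1) = if 1 ≤ k ∧ pvG xs k = pvG xs (k-1) then pvRun xs k + 1 else 1 := rfl
      by_cases hc : (if k = 0 then none else some (pvG xs (k-1))) = some (pvG xs k)
      · obtain ⟨h1, h2⟩ := hprev.mp hc
        simp [hc, this, h1, h2.symm]
      · have : ¬ (1 ≤ k ∧ pvG xs k = pvG xs (k-1)) := by
          intro ⟨h1, h2⟩; exact hc (hprev.mpr ⟨h1, h2.symm⟩)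
        simp [hc, pvRun, this]
    · -- prev component
      simp
    · -- total component
      show pvQ xs k + pvG xs k = pvQ xs (k+1)
      rw [pvQ_succ xs k hkn]
    · -- last_psum component
      show (pvPsum xs k).insert (pvG xs k) (pvQ xs k + pvG xs k) = pvPsum xs (k+1)
      rw [show pvPsum xs (k+1) = (pvPsum xs k).insert (pvG xs k) (pvQ xs (k+1)) from rfl,
        pvQ_succ xs k hkn]
    · -- prefix component
      show pvPref xs k ++ [pvQ xs k + pvG xs k] = pvPref xs (k+1)
      unfold pvPref
      simp only [List.range_succ, List.map_append, List.map_cons, List.map_nil]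
      rw [pvQ_succ xs k hkn]

-- ===== VERDICT (by name: the statement is the Claim_ definition above) =====
theorem continuous_segment_spec : Claim_equal_continuous_segment := by
  intro capacity _
  unfold Spec_continuous_segment
  have hA : continuous_segment capacity
      = pvT capacity capacity.length + pvS capacity capacity.length := by
    show ((PySem.List.pyRange 0 (capacity.length : Int) 1).foldl csLoop2Step
        ((PySem.List.pyRange 2 (capacity.length : Int) 1).foldl (csLoop1Step capacity) 0,
          PySem.Dict.empty, capacity)).1 = _
    rw [A_loop1 capacity capacity.length 0,
      A_loop2 capacity (0 + pvT capacity capacity.length) capacity.length (le_refl _)]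
    show 0 + pvT capacity capacity.length + pvS capacity capacity.length = _
    ring
  have hB : continuous_segment_alt capacity
      = pvT capacity capacity.length + pvS capacity capacity.length := by
    have h := B_loop capacity capacity.length (le_refl _)
    rw [List.take_length] at h
    show (capacity.foldl csAltStep (0, 0, none, 0, PySem.Dict.empty, [])).1 = _
    rw [h]
  rw [hA, hB]
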